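-- pv_equiv track=rewrite | github.com/yoounhk/algorithms-python | src/Programmers/L2_T5/P1.py | solution
-- ===== SOURCE A (Python) =====
-- def solution(s):
--     if len(s) == 0:
--         return 1
--     elif len(s) == 1:
--         return 0
--     else:
--         for i in range(1, len(s)):
--             prev = s[i - 1]
--             if s[i] == prev and i + 1 < len(s):
--                 return solution(s[:i - 1] + s[i + 1:])
--             elif s[i] == prev and i + 1 == len(s):
--                 return solution(s[:i - 1])
--         return 0
-- ===== SOURCE B (Python) =====
-- def solution(s):
--     stack = []
--     for c in s:
--         if stack and stack[-1] == c:
--             stack.pop()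
--         else:
--             stack.append(c)
--     return 1 if not stack else 0
-- ===== Notes on version B (the rewrite author's own statement) =====
-- stated objective: faster
-- what changed: Replaced A's recursive scan-and-rebuild (find the first adjacent equal pair, rebuild the string without it, recurse) with a single left-to-right pass maintaining a stack that pops on a matching top; empty stack at the end means reducible.
import Mathlib
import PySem

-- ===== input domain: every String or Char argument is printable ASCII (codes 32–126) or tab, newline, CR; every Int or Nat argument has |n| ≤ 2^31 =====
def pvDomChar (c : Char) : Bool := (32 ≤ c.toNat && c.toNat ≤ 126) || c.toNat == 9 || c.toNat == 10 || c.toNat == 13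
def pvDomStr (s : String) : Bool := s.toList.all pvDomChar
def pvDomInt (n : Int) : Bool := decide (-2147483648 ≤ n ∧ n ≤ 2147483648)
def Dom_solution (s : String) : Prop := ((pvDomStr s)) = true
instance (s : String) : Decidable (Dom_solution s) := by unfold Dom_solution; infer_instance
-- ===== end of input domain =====

-- B replaces A's quadratic recursive pair-removal with a single linear stack pass (objective: faster; asymptotic).


-- ===== PORT A =====
-- A's `for i in range(1, len(s))` loop: scan i = j, j+1, …; at the first i with s[i] == s[i-1]
-- return that i (A then recurses); falling off the range returns none (A then returns 0).
def pvPairIdx (l : List Char) (j : Nat) : Option Nat :=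
  if h : j < l.length then
    if l[j]'h = l[j-1]'(by omega) then some j
    else pvPairIdx l (j+1)
  else none
termination_by l.length - j

theorem pvPairIdx_some {l : List Char} {j i : Nat} (h : pvPairIdx l j = some i) :
    j ≤ i ∧ ∃ hi : i < l.length, l[i]'hi = l[i-1]'(by omega) := by
  fun_induction pvPairIdx l j with
  | case1 j hj heq => simp at h; subst h; exact ⟨le_refl _, hj, heq⟩
  | case2 j hj hne ih =>
    obtain ⟨h1, h2⟩ := ih h
    exact ⟨by omega, h2⟩
  | case3 _ _ => simp at h

-- Port of A on the character list of s; Python's s[:i-1] is l.take (i-1) and s[i+1:] is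
-- l.drop (i+1) (both slice bounds are nonnegative here, i ≥ 1), exact on this domain.
def solGo (l : List Char) : Int :=
  if l.length = 0 then 1
  else if l.length = 1 then 0
  else
    match h : pvPairIdx l 1 with
    | some i =>
        if i + 1 < l.length then solGo (l.take (i-1) ++ l.drop (i+1))
        else solGo (l.take (i-1))
    | none => 0
termination_by l.length
decreasing_by
  · obtain ⟨h1, h2, _⟩ := pvPairIdx_some h
    simp [List.length_take, List.length_drop]; omega
  · obtain ⟨h1, h2, _⟩ := pvPairIdx_some h
    simp [List.length_take]; omega

def solution (s : String) : Int := solGo s.toList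

-- ===== PORT B =====
-- one stack step: pop on matching top, else push (stack top = list head)
def pvStep (st : List Char) (c : Char) : List Char :=
  match st with
  | t :: r => if t = c then r else c :: t :: r
  | [] => [c]

def solution_alt (s : String) : Int :=
  if s.toList.foldl pvStep [] = [] then 1 else 0

-- ===== PRECONDITION & SPEC =====
def Spec_solution (s : String) (out : Int) : Prop := out = solution_alt s
instance (s : String) (out : Int) : Decidable (Spec_solution s out) := by unfold Spec_solution; infer_instance

-- ===== CLAIM (what is proved, stated in full; the proofs are below) =====
def Claim_equal_solution : Prop := ∀ (s : String), Dom_solution s → Spec_solution s (solution s)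

-- ===== LEMMAS AND PROOFS =====

-- no two adjacent equal characters
def NoAdj : List Char → Prop
  | a :: b :: t => a ≠ b ∧ NoAdj (b :: t)
  | _ => True

theorem noAdj_step {st : List Char} (h : NoAdj st) (c : Char) : NoAdj (pvStep st c) := by
  match st with
  | [] => simp [pvStep, NoAdj]
  | t :: r =>
    simp only [pvStep]
    split_ifs with hc
    · match r with
      | [] => trivial
      | x :: r' => exact h.2
    · exact ⟨fun e => hc e.symm, h⟩

theorem step_step {st : List Char} (h : NoAdj st) (c : Char) :
    pvStep (pvStep st c) c = st := by
  match st with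
  | [] => simp [pvStep]
  | t :: r =>
    simp only [pvStep]
    split_ifs with hc
    · subst hc
      match r with
      | [] => simp [pvStep]
      | x :: r' =>
        have hx : x ≠ t := fun e => h.1 e.symm
        simp [hx]
    · simp

theorem foldl_removePair (a : List Char) (c : Char) (b : List Char) :
    ∀ st : List Char, NoAdj st →
      List.foldl pvStep st (a ++ c :: c :: b) = List.foldl pvStep st (a ++ b) := by
  induction a with
  | nil =>
    intro st h
    simp [List.foldl, step_step h]
  | cons x a ih =>
    intro st h
    simpa [List.foldl] using ih (pvStep st x) (noAdj_step h x)

theorem noAdj_run (l : List Char) (h : NoAdj l) :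
    List.foldl pvStep [] l = l.reverse := by
  induction l using List.reverseRecOn with
  | nil => rfl
  | append_singleton a c ih =>
    have ha : NoAdj a := by
      clear ih
      induction a with
      | nil => trivial
      | cons x t iht =>
        match t with
        | [] => trivial
        | y :: t' => exact ⟨h.1, iht h.2⟩
    rw [List.foldl_append, ih ha]
    match a with
    | [] => rfl
    | x :: t =>
      have hlast : (x :: t).getLast (by simp) ≠ c := by
        clear ih ha
        induction t generalizing x with
        | nil => exact h.1
        | cons y t' iht => simpa [List.getLast] using iht y h.2
      have hrev : (x :: t).reverse = (x :: t).getLast (by simp) :: (x :: t).dropLast.reverse := by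
        conv_lhs => rw [← List.dropLast_append_getLast (l := x :: t) (by simp)]
        simp
      simp only [List.foldl, hrev, pvStep]
      rw [if_neg hlast, ← hrev]
      simp

theorem pvPairIdx_none {l : List Char} {j : Nat} (h : pvPairIdx l j = none) :
    ∀ i, j ≤ i → (hi : i < l.length) → l[i]'hi ≠ l[i-1]'(by omega) := by
  fun_induction pvPairIdx l j with
  | case1 j hj heq => simp at h
  | case2 j hj hne ih =>
    intro i hji hi
    rcases Nat.eq_or_lt_of_le hji with rfl | hlt
    · exact hne
    · exact ih h i hlt hi
  | case3 j hj =>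
    intro i hji hi; omega

theorem noAdj_of_forall : ∀ l : List Char,
    (∀ i (hi : i+1 < l.length), l[i]'(by omega) ≠ l[i+1]'hi) → NoAdj l
  | [], _ => trivial
  | [_], _ => trivial
  | a :: b :: t, h =>
    ⟨h 0 (by simp),
     noAdj_of_forall (b :: t) (fun i hi => by
       have := h (i+1) (by simp only [List.length_cons] at hi ⊢; omega)
       simpa using this)⟩

theorem noAdj_of_none {l : List Char} (h : pvPairIdx l 1 = none) : NoAdj l := by
  have key := pvPairIdx_none h
  refine noAdj_of_forall l (fun i hi hne => ?_)
  have := key (i+1) (by omega) hi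
  simp only [Nat.add_sub_cancel] at this
  exact this hne.symm

theorem decompose (l : List Char) (i : Nat) (h1 : 1 ≤ i) (h2 : i < l.length) :
    l = l.take (i-1) ++ (l[i-1]'(by omega)) :: (l[i]'h2) :: l.drop (i+1) := by
  have e0 : i - 1 + 1 = i := by omega
  have e1 : l.drop (i-1) = (l[i-1]'(by omega)) :: l.drop i := by
    rw [List.drop_eq_getElem_cons (by omega), e0]
  have e2 : l.drop i = (l[i]'h2) :: l.drop (i+1) := by
    rw [List.drop_eq_getElem_cons h2]
  conv_lhs => rw [← List.take_append_drop (i-1) l]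
  rw [e1, e2]

theorem solGo_eq_stack_aux (n : Nat) : ∀ l : List Char, l.length ≤ n →
    solGo l = if List.foldl pvStep [] l = [] then 1 else 0 := by
  induction n with
  | zero =>
    intro l hn
    match l with
    | [] => simp [solGo]
  | succ n ih =>
  intro l hn
  match hl : l with
  | [] => simp [solGo]
  | [c] => simp [solGo, List.foldl, pvStep]
  | a :: b :: t =>
    rw [solGo, if_neg (by simp : ¬(a :: b :: t).length = 0),
        if_neg (by simp : ¬(a :: b :: t).length = 1)]
    match hp : pvPairIdx (a :: b :: t) 1 with
    | some i =>
      obtain ⟨hi1, hi2, hcc⟩ := pvPairIdx_some hp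
      show (if i + 1 < (a :: b :: t).length then
              solGo ((a :: b :: t).take (i-1) ++ (a :: b :: t).drop (i+1))
            else solGo ((a :: b :: t).take (i-1)))
          = if List.foldl pvStep [] (a :: b :: t) = [] then 1 else 0
      set L := a :: b :: t with hL
      have hdec := decompose L i hi1 hi2
      rw [hcc] at hdec
      set c := L[i-1]'(by omega) with hc
      have hfold : List.foldl pvStep [] L = List.foldl pvStep [] (L.take (i-1) ++ L.drop (i+1)) := by
        conv_lhs => rw [hdec]
        exact foldl_removePair _ c _ [] trivial
      have hA : (a :: b :: t).length = t.length + 2 := by simp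
      have hB : L.length = t.length + 2 := by rw [hL]; simp
      have hn' : t.length + 2 ≤ n + 1 := by rw [hL] at hn; simpa using hn
      by_cases hcase : i + 1 < L.length
      · rw [if_pos hcase, ih _ (by simp [List.length_take, List.length_drop]; omega), hfold]
      · rw [if_neg hcase]
        have hieq : i + 1 = L.length := by omega
        have hdrop : L.drop (i+1) = [] := by
          apply List.drop_eq_nil_of_le; omega
        rw [ih _ (by simp [List.length_take]; omega), hfold, hdrop, List.append_nil]
    | none =>
      show (0 : Int) = if List.foldl pvStep [] (a :: b :: t) = [] then 1 else 0
      have := noAdj_run _ (noAdj_of_none hp)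
      rw [this]
      simp

theorem solGo_eq_stack (l : List Char) :
    solGo l = if List.foldl pvStep [] l = [] then 1 else 0 :=
  solGo_eq_stack_aux l.length l (le_refl _)

-- ===== VERDICT (by name: the statement is the Claim_ definition above) =====
theorem solution_spec : Claim_equal_solution := by
  intro s _
  unfold Spec_solution solution solution_alt
  exact solGo_eq_stack s.toList
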